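-- pv_equiv track=rewrite | github.com/tstaffas/Q-micro | Analysis/Python code/Microscope_library.py | EqualMatrix
-- ===== SOURCE A (Python) =====
-- def EqualMatrix(dimX, dimY, Sbins, countrate):
--     """
--         Method 4. Create a non speed adjusted pixel matrix
--             places an equal amount of bins in each pixel
--     """
--     num_pix = int(Sbins / dimY)
--     pixel_part = [0] * dimY
--     matrix = []
--     k = 0
--
--     for i in range(dimX):
--         for j in range(len(pixel_part)):
--             for l in range(num_pix):
--                 pixel_part[j] += countrate[k]
--                 k +=1
--         if (i+1) % 2 != 1:
--             pixel_part.reverse()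
--             t = 1
--         matrix.append(pixel_part)
--         pixel_part = [0] * dimY
--     return matrix
-- ===== SOURCE B (Python) =====
-- def EqualMatrix(dimX, dimY, Sbins, countrate):
--     num_pix = int(Sbins / dimY)
--     rows = max(dimX, 0)
--     cols = max(dimY, 0)
--     matrix = [[0] * cols for _ in range(rows)]
--     per_row = cols * max(num_pix, 0)
--     # scatter pass: send each count straight to its serpentine cell
--     for k in range(rows * per_row):
--         i = k // per_row
--         c = (k // num_pix) % cols
--         if i % 2 == 1:
--             c = cols - 1 - c
--         matrix[i][c] += countrate[k]
--     return matrix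
-- ===== Notes on version B (the rewrite author's own statement) =====
-- stated objective: alternative
-- what changed: Replaces A's gather (triple-nested loops accumulating a row buffer, then reversing odd rows) by a single flat scatter pass over countrate that routes each element to its serpentine cell (row, column) computed by div/mod index arithmetic, with no row buffer and no reversal step.
import Mathlib
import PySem

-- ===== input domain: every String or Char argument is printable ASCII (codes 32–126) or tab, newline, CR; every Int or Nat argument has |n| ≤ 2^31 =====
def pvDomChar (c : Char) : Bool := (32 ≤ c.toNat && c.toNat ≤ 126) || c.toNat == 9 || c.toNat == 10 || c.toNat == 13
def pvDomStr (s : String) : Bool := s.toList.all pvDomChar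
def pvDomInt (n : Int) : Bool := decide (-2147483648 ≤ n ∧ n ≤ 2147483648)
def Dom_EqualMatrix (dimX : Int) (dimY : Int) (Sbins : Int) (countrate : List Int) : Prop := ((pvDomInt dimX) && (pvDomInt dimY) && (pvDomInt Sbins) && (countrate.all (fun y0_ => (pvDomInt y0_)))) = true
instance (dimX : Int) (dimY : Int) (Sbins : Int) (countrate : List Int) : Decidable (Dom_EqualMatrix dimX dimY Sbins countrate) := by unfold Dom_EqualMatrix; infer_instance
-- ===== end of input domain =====

-- B replaces A's gather (triple-nested accumulation into a row buffer, reversing odd rows)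
-- by a single flat scatter pass that sends each count directly to its serpentine cell (objective: alternative).

-- ===== PORT A =====
-- countrate[k] is ported as pyGetD … 0 (k ≥ 0 throughout); the inputs where Python raises
-- (dimY = 0: ZeroDivisionError; countrate too short: IndexError) are excluded by Pre_EqualMatrix.
-- num_pix = int(Sbins / dimY) is PySem.Int.truncdiv (exact for |Sbins|,|dimY| ≤ 2^31 < 2^53).
-- (i+1) % 2 uses Lean's % : divisor 2 > 0, where it agrees with Python's %; the flag t is dead and dropped.
def EqualMatrix (dimX : Int) (dimY : Int) (Sbins : Int) (countrate : List Int) : List (List Int) :=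
  let num_pix := PySem.Int.truncdiv Sbins dimY
  -- state = (pixel_part, matrix, k); pixel_part = [0]*dimY
  let st :=
    (PySem.List.pyRange 0 dimX 1).foldl
      (fun (st : List Int × List (List Int) × Int) i =>
        let st2 :=
          (PySem.List.pyRange 0 (st.1.length : Int) 1).foldl
            (fun (st2 : List Int × Int) j =>
              (PySem.List.pyRange 0 num_pix 1).foldl
                (fun (st3 : List Int × Int) _l =>
                  (PySem.List.pySetD st3.1 j
                     (PySem.List.pyGetD st3.1 j 0 + PySem.List.pyGetD countrate st3.2 0),
                   st3.2 + 1))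
                st2)
            (st.1, st.2.2)
        let pp := if (i + 1) % 2 ≠ 1 then st2.1.reverse else st2.1
        (List.replicate dimY.toNat 0, st.2.1 ++ [pp], st2.2))
      (List.replicate dimY.toNat 0, [], 0)
  st.2.1

-- ===== PORT B =====
-- transliteration of Source B: zero matrix, then one flat scatter loop; matrix[i][c] += countrate[k]
-- is get row / get cell / set cell / set row with pyGetD/pySetD.
def EqualMatrix_alt (dimX : Int) (dimY : Int) (Sbins : Int) (countrate : List Int) : List (List Int) :=
  let num_pix := PySem.Int.truncdiv Sbins dimY
  let rows := max dimX 0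
  let cols := max dimY 0
  let matrix0 : List (List Int) :=
    (PySem.List.pyRange 0 rows 1).map (fun _ => List.replicate cols.toNat 0)
  let per_row := cols * max num_pix 0
  (PySem.List.pyRange 0 (rows * per_row) 1).foldl
    (fun m k =>
      let i := PySem.Int.floordiv k per_row
      let c0 := PySem.Int.mod (PySem.Int.floordiv k num_pix) cols
      let c := if PySem.Int.mod i 2 == 1 then cols - 1 - c0 else c0
      let row := PySem.List.pyGetD m i []
      PySem.List.pySetD m i
        (PySem.List.pySetD row c (PySem.List.pyGetD row c 0 + PySem.List.pyGetD countrate k 0)))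
    matrix0

-- ===== PRECONDITION & SPEC =====
-- Pre_ excludes exactly the inputs where Python A raises: dimY = 0 (ZeroDivisionError) and a
-- countrate too short for the dimX*dimY*num_pix sequential element reads (IndexError).
def Pre_EqualMatrix (dimX : Int) (dimY : Int) (Sbins : Int) (countrate : List Int) : Prop :=
  dimY ≠ 0 ∧ (0 < dimX → 0 < dimY → 0 < PySem.Int.truncdiv Sbins dimY →
    dimX * dimY * PySem.Int.truncdiv Sbins dimY ≤ (countrate.length : Int))
instance (dimX : Int) (dimY : Int) (Sbins : Int) (countrate : List Int) : Decidable (Pre_EqualMatrix dimX dimY Sbins countrate) := by unfold Pre_EqualMatrix; infer_instance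
def pvWitness_EqualMatrix : Int × Int × Int × List Int := (3, 2, 4, [1, 2, 3, 4, 5, 6, 7, 8, 9, 10, 11, 12])
def Spec_EqualMatrix (dimX : Int) (dimY : Int) (Sbins : Int) (countrate : List Int) (out : List (List Int)) : Prop := out = EqualMatrix_alt dimX dimY Sbins countrate
instance (dimX : Int) (dimY : Int) (Sbins : Int) (countrate : List Int) (out : List (List Int)) : Decidable (Spec_EqualMatrix dimX dimY Sbins countrate out) := by unfold Spec_EqualMatrix; infer_instance

-- ===== CLAIM (what is proved, stated in full; the proofs are below) =====
def Claim_equal_EqualMatrix : Prop := ∀ (dimX : Int) (dimY : Int) (Sbins : Int) (countrate : List Int), Dom_EqualMatrix dimX dimY Sbins countrate → Pre_EqualMatrix dimX dimY Sbins countrate → Spec_EqualMatrix dimX dimY Sbins countrate (EqualMatrix dimX dimY Sbins countrate)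

-- ===== LEMMAS AND PROOFS =====
-- Both ports are reduced to one closed form pvMat: row i, column c holds the sum of the
-- num_pix countrate cells of chunk pvT Y i c (the serpentine chunk index).

lemma pv_reverse_map_range {α : Type} (Y : Nat) (f : Nat → α) :
    ((List.range Y).map f).reverse = (List.range Y).map (fun c => f (Y - 1 - c)) := by
  apply List.ext_getElem (by simp)
  intro i h1 h2
  simp only [List.getElem_reverse, List.getElem_map, List.getElem_range]
  simp at h2
  congr 1
  simp
lemma pv_set_self (p : List Int) (j : Nat) (hj : j < p.length) : p = p.set j (p.getD j 0) := by
  apply List.ext_getElem (by simp)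
  intro i h1 h2
  rcases eq_or_ne i j with rfl | hne
  · simp [List.getElem?_eq_getElem hj]
  · rw [List.getElem_set_ne (by omega)]
lemma pv_set_map_range {α : Type} (X i0 : Nat) (h : i0 < X) (f : Nat → α) (v : α) :
    ((List.range X).map f).set i0 v
      = (List.range X).map (fun i => if i = i0 then v else f i) := by
  apply List.ext_getElem (by simp)
  intro i h1 h2
  simp at h2
  rcases eq_or_ne i i0 with rfl | hne
  · simp
  · rw [List.getElem_set_ne (by omega)]
    simp [hne]

def pvS (cr : List Int) (a m : Nat) : Int :=
  ((List.range m).map (fun j => PySem.List.pyGetD cr ((a + j : Nat) : Int) 0)).sum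
lemma pvS_succ (cr : List Int) (a m : Nat) :
    pvS cr a (m + 1) = pvS cr a m + PySem.List.pyGetD cr ((a + m : Nat) : Int) 0 := by
  simp [pvS, List.range_succ]
lemma pv_inner (cr : List Int) (n : Nat) (p : List Int) (j : Nat) (hj : j < p.length) (a : Nat) :
    ((PySem.List.pyRange 0 (n : Int) 1).foldl
      (fun (st3 : List Int × Int) _l =>
        (PySem.List.pySetD st3.1 (j : Int)
           (PySem.List.pyGetD st3.1 (j : Int) 0 + PySem.List.pyGetD cr st3.2 0),
         st3.2 + 1))
      (p, (a : Int)))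
    = ((p.set j (p.getD j 0 + pvS cr a n), ((a + n : Nat) : Int)) : List Int × Int) := by
  induction n generalizing p a with
  | zero =>
    rw [show ((0:Nat):Int) = 0 from rfl, PySem.List.pyRange_one_eq_nil (le_refl 0)]
    simp only [List.foldl_nil, pvS, List.range_zero, List.map_nil, List.sum_nil,
      Int.add_zero, Nat.add_zero]
    rw [← pv_set_self p j hj]
  | succ m ih =>
    rw [show ((m + 1 : Nat) : Int) = ((m : Nat) : Int) + 1 by push_cast; ring,
        PySem.List.pyRange_one_succ_right (by positivity), List.foldl_append, ih p hj a]
    simp only [List.foldl_cons, List.foldl_nil]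
    rw [PySem.List.pySetD_natCast]
    have hset : (p.set j (p.getD j 0 + pvS cr a m)).length = p.length := by simp
    rw [show PySem.List.pyGetD (p.set j (p.getD j 0 + pvS cr a m)) (j : Int) 0
          = p.getD j 0 + pvS cr a m by
      rw [PySem.List.pyGetD_natCast]
      simp [hj]]
    rw [List.set_set, pvS_succ]
    simp only [Prod.mk.injEq]
    refine ⟨by rw [Int.add_assoc], by push_cast; ring⟩

lemma pv_mid (cr : List Int) (n Y d : Nat) (hd : d ≤ Y) (a : Nat) :
    ((PySem.List.pyRange 0 (d : Int) 1).foldl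
      (fun (st2 : List Int × Int) j =>
        (PySem.List.pyRange 0 (n : Int) 1).foldl
          (fun (st3 : List Int × Int) _l =>
            (PySem.List.pySetD st3.1 j
               (PySem.List.pyGetD st3.1 j 0 + PySem.List.pyGetD cr st3.2 0),
             st3.2 + 1))
          st2)
      (List.replicate Y (0 : Int), (a : Int)))
    = ((List.range Y).map (fun j => if j < d then pvS cr (a + j * n) n else 0),
       ((a + d * n : Nat) : Int)) := by
  induction d with
  | zero =>
    rw [show ((0:Nat):Int) = 0 from rfl, PySem.List.pyRange_one_eq_nil (le_refl 0)]
    simp only [List.foldl_nil, Nat.add_zero, Nat.zero_mul]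
    congr 1
    apply List.ext_getElem (by simp)
    intro i h1 h2
    simp
  | succ m ih =>
    have hm : m ≤ Y := by omega
    rw [show ((m + 1 : Nat) : Int) = ((m : Nat) : Int) + 1 by push_cast; ring,
        PySem.List.pyRange_one_succ_right (by positivity), List.foldl_append, ih hm]
    simp only [List.foldl_cons, List.foldl_nil]
    rw [pv_inner cr n _ m (by simp; omega) (a + m * n)]
    simp only [Prod.mk.injEq]
    constructor
    · rw [pv_set_map_range Y m (by omega)]
      apply List.map_congr_left
      intro j hjY
      simp only [List.mem_range] at hjY
      rcases eq_or_ne j m with rfl | hne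
      · rw [if_pos (by omega : j < j + 1), if_pos rfl,
           List.getD_eq_getElem _ _ (by simp [hjY]),
           show ∀ h, ((List.range Y).map fun j2 => if j2 < j then pvS cr (a + j2 * n) n else 0)[j]'h
             = 0 from fun h => by
               simp only [List.getElem_map, List.getElem_range]; rw [if_neg (by omega)]]
        simp
      · simp only [if_neg hne]
        rcases Nat.lt_or_ge j m with hlt | hge
        · rw [if_pos hlt, if_pos (by omega)]
        · rw [if_neg (by omega), if_neg (by omega)]
    · push_cast; ring

def pvT (Y i c : Nat) : Nat := i * Y + (if i % 2 = 1 then Y - 1 - c else c)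

def pvMat (cr : List Int) (X Y n : Nat) : List (List Int) :=
  (List.range X).map (fun i => (List.range Y).map (fun c => pvS cr (pvT Y i c * n) n))

lemma pv_outer (cr : List Int) (n Y : Nat) (x : Nat) :
    ((PySem.List.pyRange 0 (x : Int) 1).foldl
      (fun (st : List Int × List (List Int) × Int) i =>
        let st2 :=
          (PySem.List.pyRange 0 (st.1.length : Int) 1).foldl
            (fun (st2 : List Int × Int) j =>
              (PySem.List.pyRange 0 (n : Int) 1).foldl
                (fun (st3 : List Int × Int) _l =>
                  (PySem.List.pySetD st3.1 j
                     (PySem.List.pyGetD st3.1 j 0 + PySem.List.pyGetD cr st3.2 0),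
                   st3.2 + 1))
                st2)
            (st.1, st.2.2)
        let pp := if (i + 1) % 2 ≠ 1 then st2.1.reverse else st2.1
        (List.replicate Y 0, st.2.1 ++ [pp], st2.2))
      (List.replicate Y (0 : Int), ([] : List (List Int)), (0 : Int)))
    = (List.replicate Y 0, pvMat cr x Y n, ((x * (Y * n) : Nat) : Int)) := by
  induction x with
  | zero =>
    rw [show ((0:Nat):Int) = 0 from rfl, PySem.List.pyRange_one_eq_nil (le_refl 0)]
    simp [pvMat]
  | succ m ih =>
    rw [show ((m + 1 : Nat) : Int) = ((m : Nat) : Int) + 1 by push_cast; ring,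
        PySem.List.pyRange_one_succ_right (by positivity), List.foldl_append, ih]
    simp only [List.foldl_cons, List.foldl_nil]
    have hlen : (List.replicate Y (0 : Int)).length = Y := by simp
    rw [show ((List.replicate Y (0 : Int)).length : Int) = ((Y : Nat) : Int) by rw [hlen],
        pv_mid cr n Y Y (le_refl Y) (m * (Y * n))]
    simp only [Prod.mk.injEq]
    refine ⟨by trivial, ?_, by push_cast; ring⟩
    have hrow : ((List.range Y).map
          (fun j => if j < Y then pvS cr (m * (Y * n) + j * n) n else 0))
        = (List.range Y).map (fun j => pvS cr ((m * Y + j) * n) n) := by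
      apply List.map_congr_left
      intro j hj
      simp only [List.mem_range] at hj
      rw [if_pos hj]
      congr 1
      ring
    rw [hrow]
    have hmat : pvMat cr (m + 1) Y n
        = pvMat cr m Y n ++ [(List.range Y).map (fun c => pvS cr (pvT Y m c * n) n)] := by
      simp [pvMat, List.range_succ]
    rw [hmat]
    congr 1
    rcases Nat.even_or_odd m with he | ho
    · have h2 : m % 2 = 0 := Nat.even_iff.mp he
      rw [if_neg (by omega)]
      congr 1
      apply List.map_congr_left
      intro c hc
      simp only [pvT, h2]
      norm_num
    · have h2 : m % 2 = 1 := Nat.odd_iff.mp ho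
      rw [if_pos (by omega), pv_reverse_map_range]
      congr 1
      apply List.map_congr_left
      intro c hc
      simp only [pvT, h2]
      norm_num

def pvVal (cr : List Int) (Y n K i c : Nat) : Int :=
  pvS cr (pvT Y i c * n) (min n (K - pvT Y i c * n))

lemma pv_getD_map_range {α : Type} (X i0 : Nat) (h : i0 < X) (f : Nat → α) (d : α) :
    ((List.range X).map f).getD i0 d = f i0 := by
  rw [List.getD_eq_getElem _ _ (by simp [h])]
  simp

lemma pv_rowcol_unique (Y i s i' s' : Nat) (hs : s < Y) (hs' : s' < Y)
    (h : i * Y + s = i' * Y + s') : i = i' ∧ s = s' := by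
  have h3 : s = s' := by
    have := congrArg (· % Y) h
    simpa [Nat.mod_eq_of_lt hs, Nat.mod_eq_of_lt hs'] using this
  subst h3
  have h4 : i * Y = i' * Y := by omega
  exact ⟨Nat.eq_of_mul_eq_mul_right (by omega) h4, rfl⟩

-- pvT is injective as a chunk index, and hits t exactly at (t/Y, serp column)
lemma pv_pvT_eq_iff (Y i c t : Nat) (hY : 0 < Y) (_hc : c < Y) :
    pvT Y i c = t ↔ (i = t / Y ∧ c = (if (t / Y) % 2 = 1 then Y - 1 - t % Y else t % Y)) := by
  have hmod : t % Y < Y := Nat.mod_lt _ hY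
  have hdecomp : (t / Y) * Y + t % Y = t := by
    rw [Nat.mul_comm]; exact Nat.div_add_mod t Y
  constructor
  · intro h
    have hs : (if i % 2 = 1 then Y - 1 - c else c) < Y := by split_ifs <;> omega
    obtain ⟨hi, hsv⟩ := pv_rowcol_unique Y i (if i % 2 = 1 then Y - 1 - c else c)
      (t / Y) (t % Y) hs hmod (by rw [← pvT, h, hdecomp])
    subst hi
    refine ⟨rfl, ?_⟩
    rcases eq_or_ne ((t / Y) % 2) 1 with hp | hp
    · rw [if_pos hp] at hsv; rw [if_pos hp]; omega
    · rw [if_neg hp] at hsv; rw [if_neg hp]; omega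
  · rintro ⟨rfl, rfl⟩
    simp only [pvT]
    rcases eq_or_ne ((t / Y) % 2) 1 with hp | hp
    · rw [if_pos hp, if_pos hp]; omega
    · rw [if_neg hp, if_neg hp]; omega

lemma pv_val_step (cr : List Int) (Y n K i c : Nat) (hn : 0 < n) (_hc : c < Y) :
    pvVal cr Y n (K + 1) i c
      = if pvT Y i c = K / n then pvVal cr Y n K i c + PySem.List.pyGetD cr ((K : Nat) : Int) 0
        else pvVal cr Y n K i c := by
  have hK : n * (K / n) + K % n = K := Nat.div_add_mod K n
  by_cases h : pvT Y i c = K / n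
  · rw [if_pos h]
    have hr : K % n < n := Nat.mod_lt _ hn
    have hcm : pvT Y i c * n = n * (K / n) := by rw [h, Nat.mul_comm]
    have h1 : min n (K - pvT Y i c * n) = K % n := by rw [hcm]; omega
    have h2 : min n (K + 1 - pvT Y i c * n) = K % n + 1 := by rw [hcm]; omega
    have hidx : pvT Y i c * n + K % n = K := by rw [hcm]; omega
    simp only [pvVal, h1, h2]
    rw [pvS_succ, hidx]
  · rw [if_neg h]
    have hr : K % n < n := Nat.mod_lt _ hn
    have heq : min n (K + 1 - pvT Y i c * n) = min n (K - pvT Y i c * n) := by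
      rcases Nat.lt_or_ge (pvT Y i c) (K / n) with hlt | hge
      · have hm := Nat.mul_le_mul_right n (show pvT Y i c + 1 ≤ K / n by omega)
        rw [Nat.succ_mul] at hm
        have hd : (K / n) * n ≤ K := Nat.div_mul_le_self K n
        omega
      · have hgt : K / n + 1 ≤ pvT Y i c := by omega
        have hm := Nat.mul_le_mul_right n hgt
        rw [Nat.succ_mul] at hm
        have : (K / n) * n = n * (K / n) := Nat.mul_comm _ _
        omega
    simp only [pvVal, heq]

lemma pv_val_zero (cr : List Int) (Y n i c : Nat) : pvVal cr Y n 0 i c = 0 := by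
  simp [pvVal, pvS]

lemma pv_val_final (cr : List Int) (X Y n i c : Nat) (hi : i < X) (_hc : c < Y) :
    pvVal cr Y n (X * (Y * n)) i c = pvS cr (pvT Y i c * n) n := by
  have ht : pvT Y i c + 1 ≤ X * Y := by
    have h1 : (i + 1) * Y ≤ X * Y := Nat.mul_le_mul_right Y (by omega)
    rw [Nat.succ_mul] at h1
    simp only [pvT]
    split_ifs <;> omega
  have h2 := Nat.mul_le_mul_right n ht
  rw [Nat.succ_mul, Nat.mul_assoc] at h2
  simp only [pvVal]
  congr 1
  omega

lemma pv_scatter (cr : List Int) (X Y n : Nat) (num_pix : Int) (hnp : num_pix.toNat = n)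
    (K : Nat) (hK : K ≤ X * (Y * n)) :
    ((PySem.List.pyRange 0 (K : Int) 1).foldl
      (fun m k =>
        let i := PySem.Int.floordiv k ((Y * n : Nat) : Int)
        let c0 := PySem.Int.mod (PySem.Int.floordiv k num_pix) ((Y : Nat) : Int)
        let c := if PySem.Int.mod i 2 == 1 then ((Y : Nat) : Int) - 1 - c0 else c0
        let row := PySem.List.pyGetD m i []
        PySem.List.pySetD m i
          (PySem.List.pySetD row c (PySem.List.pyGetD row c 0 + PySem.List.pyGetD cr k 0)))
      ((List.range X).map (fun _ => List.replicate Y (0 : Int))))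
    = (List.range X).map (fun i => (List.range Y).map (fun c => pvVal cr Y n K i c)) := by
  induction K with
  | zero =>
    rw [show ((0:Nat):Int) = 0 from rfl, PySem.List.pyRange_one_eq_nil (le_refl 0)]
    simp only [List.foldl_nil]
    apply List.map_congr_left
    intro i _
    apply List.ext_getElem (by simp)
    intro c h1 h2
    simp [pv_val_zero]
  | succ K ih =>
    have hK' : K < X * (Y * n) := by omega
    have hYn : 0 < Y * n := by
      rcases Nat.eq_zero_or_pos (Y * n) with h | h
      · rw [h, Nat.mul_zero] at hK'; omega
      · exact h
    have hY : 0 < Y := by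
      rcases Nat.eq_zero_or_pos Y with rfl | h
      · simp at hYn
      · exact h
    have hn : 0 < n := by
      rcases Nat.eq_zero_or_pos n with rfl | h
      · simp at hYn
      · exact h
    have hnum : num_pix = ((n : Nat) : Int) := by omega
    have hi0 : K / (Y * n) < X := (Nat.div_lt_iff_lt_mul hYn).mpr (by omega)
    set t := K / n with ht
    have hi0t : K / (Y * n) = t / Y := by
      rw [ht, Nat.div_div_eq_div_mul, Nat.mul_comm n Y]
    have hc0 : t % Y < Y := Nat.mod_lt _ hY
    set cD : Nat := if (t / Y) % 2 = 1 then Y - 1 - t % Y else t % Y with hcDdef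
    have hcDlt : cD < Y := by rw [hcDdef]; split_ifs <;> omega
    have hiX : t / Y < X := by rw [← hi0t]; exact hi0
    rw [show ((K + 1 : Nat) : Int) = ((K : Nat) : Int) + 1 by push_cast; ring,
        PySem.List.pyRange_one_succ_right (by positivity), List.foldl_append, ih (by omega)]
    simp only [List.foldl_cons, List.foldl_nil]
    rw [show PySem.Int.floordiv ((K : Nat) : Int) ((Y * n : Nat) : Int) = ((t / Y : Nat) : Int) by
          rw [PySem.Int.floordiv_natCast, hi0t]]
    rw [hnum, show PySem.Int.floordiv ((K : Nat) : Int) ((n : Nat) : Int) = ((t : Nat) : Int) by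
          rw [PySem.Int.floordiv_natCast, ht]]
    rw [show PySem.Int.mod ((t : Nat) : Int) ((Y : Nat) : Int) = ((t % Y : Nat) : Int) from
          PySem.Int.mod_natCast t Y]
    rw [show PySem.Int.mod ((t / Y : Nat) : Int) 2 = (((t / Y) % 2 : Nat) : Int) by
          exact_mod_cast PySem.Int.mod_natCast (t / Y) 2]
    have hcD : (if ((((t / Y) % 2 : Nat) : Int) == 1) then ((Y : Nat) : Int) - 1 - ((t % Y : Nat) : Int)
          else ((t % Y : Nat) : Int))
        = ((cD : Nat) : Int) := by
      simp only [beq_iff_eq, hcDdef]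
      rcases eq_or_ne ((t / Y) % 2) 1 with hp | hp
      · rw [hp, if_pos (by norm_num), if_pos rfl]
        omega
      · rw [if_neg (by exact_mod_cast hp), if_neg hp]
    rw [hcD]
    rw [show PySem.List.pyGetD ((List.range X).map (fun i => (List.range Y).map (fun c => pvVal cr Y n K i c)))
          ((t / Y : Nat) : Int) [] = (List.range Y).map (fun c => pvVal cr Y n K (t / Y) c) by
        rw [PySem.List.pyGetD_natCast, pv_getD_map_range X (t / Y) hiX]]
    rw [show PySem.List.pyGetD ((List.range Y).map (fun c => pvVal cr Y n K (t / Y) c)) ((cD : Nat) : Int) 0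
          = pvVal cr Y n K (t / Y) cD by
        rw [PySem.List.pyGetD_natCast, pv_getD_map_range Y cD hcDlt]]
    rw [PySem.List.pySetD_natCast, PySem.List.pySetD_natCast,
        pv_set_map_range Y cD hcDlt, pv_set_map_range X (t / Y) hiX]
    apply List.map_congr_left
    intro i hi
    simp only [List.mem_range] at hi
    rcases eq_or_ne i (t / Y) with rfl | hne
    · rw [if_pos rfl]
      apply List.map_congr_left
      intro c hc
      simp only [List.mem_range] at hc
      rw [pv_val_step cr Y n K (t / Y) c hn hc]
      rcases eq_or_ne c cD with rfl | hcne
      · rw [if_pos rfl, if_pos (by rw [pv_pvT_eq_iff Y (t / Y) cD t hY hc]; exact ⟨rfl, hcDdef⟩)]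
      · rw [if_neg hcne, if_neg (by
          rw [pv_pvT_eq_iff Y (t / Y) c t hY hc]
          rintro ⟨-, hc2⟩
          exact hcne (by rw [hc2, hcDdef]))]
    · rw [if_neg hne]
      apply List.map_congr_left
      intro c hc
      simp only [List.mem_range] at hc
      rw [pv_val_step cr Y n K i c hn hc,
          if_neg (by
            rw [pv_pvT_eq_iff Y i c t hY hc]
            rintro ⟨hi2, -⟩
            exact hne hi2)]

lemma pv_pyRange_toNat (a : Int) :
    PySem.List.pyRange 0 a 1 = PySem.List.pyRange 0 ((a.toNat : Nat) : Int) 1 := by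
  rw [PySem.List.pyRange_one, PySem.List.pyRange_one]
  simp only [Int.sub_zero]
  congr 1

lemma pv_A_closed (dimX dimY Sbins : Int) (cr : List Int) :
    EqualMatrix dimX dimY Sbins cr
      = pvMat cr dimX.toNat dimY.toNat (PySem.Int.truncdiv Sbins dimY).toNat := by
  simp only [EqualMatrix]
  rw [pv_pyRange_toNat dimX]
  simp only [pv_pyRange_toNat (PySem.Int.truncdiv Sbins dimY)]
  rw [pv_outer cr (PySem.Int.truncdiv Sbins dimY).toNat dimY.toNat dimX.toNat]

lemma pv_B_closed (dimX dimY Sbins : Int) (cr : List Int) :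
    EqualMatrix_alt dimX dimY Sbins cr
      = pvMat cr dimX.toNat dimY.toNat (PySem.Int.truncdiv Sbins dimY).toNat := by
  simp only [EqualMatrix_alt]
  rw [show max dimX 0 = ((dimX.toNat : Nat) : Int) from (Int.ofNat_toNat dimX).symm]
  simp only [show max dimY 0 = ((dimY.toNat : Nat) : Int) from (Int.ofNat_toNat dimY).symm,
    show max (PySem.Int.truncdiv Sbins dimY) 0
        = (((PySem.Int.truncdiv Sbins dimY).toNat : Nat) : Int) from
      (Int.ofNat_toNat _).symm]
  set X := dimX.toNat
  set Y := dimY.toNat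
  set n := (PySem.Int.truncdiv Sbins dimY).toNat
  rw [show (((Y : Nat) : Int).toNat) = Y by simp]
  rw [show ((Y : Nat) : Int) * ((n : Nat) : Int) = ((Y * n : Nat) : Int) by push_cast; ring]
  rw [show ((X : Nat) : Int) * ((Y * n : Nat) : Int) = ((X * (Y * n) : Nat) : Int) by push_cast; ring]
  rw [show (PySem.List.pyRange 0 ((X : Nat) : Int) 1).map (fun _ => List.replicate Y (0 : Int))
        = (List.range X).map (fun _ => List.replicate Y (0 : Int)) by
      rw [PySem.List.pyRange_one]
      simp [List.map_map, Function.comp_def]]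
  rw [pv_scatter cr X Y n (PySem.Int.truncdiv Sbins dimY) rfl (X * (Y * n)) (le_refl _)]
  apply List.map_congr_left
  intro i hi
  apply List.map_congr_left
  intro c hc
  simp only [List.mem_range] at hi hc
  exact pv_val_final cr X Y n i c hi hc

-- ===== VERDICT (by name: the statement is the Claim_ definition above) =====
theorem EqualMatrix_spec : Claim_equal_EqualMatrix := by
  intro dimX dimY Sbins cr _ _
  unfold Spec_EqualMatrix
  rw [pv_A_closed, pv_B_closed]
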